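-- pv_equiv track=rewrite | github.com/ja1rdev/full-stack-web-developer-ai | examples/round_point.py | round_point
-- ===== SOURCE A (Python) =====
-- def round_point(number):
--     number_str = str(abs(number)) # Absolute value as string
--     n = len(number_str)
--
--     # Validate the length of the number
--     if n < 2 or n > 6:
--         return "Invalid input"
--
--     original = number_str
--     count = 0
--     rotated = original
--
--     for _ in range(n):
--         # Rotate: move first digit to the end
--         rotated = rotated[1:] + rotated[0]
--         if rotated == original:
--             count += 1
--
--     result = "If it meets the condition" if count >= 2 else "Does not meet the condition"
--     return f"Output 1: {count}\nOutput 2: {result}"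
-- ===== SOURCE B (Python) =====
-- def round_point(number):
--     s = str(abs(number))
--     n = len(s)
--     if not 2 <= n <= 6:
--         return "Invalid input"
--     # smallest divisor d of n whose length-d prefix block tiles s; rotations
--     # equal to s are exactly the multiples of that period, so count = n // d
--     count = 1
--     for d in range(1, n):
--         if n % d == 0 and s == s[:d] * (n // d):
--             count = n // d
--             break
--     result = "If it meets the condition" if count >= 2 else "Does not meet the condition"
--     return f"Output 1: {count}\nOutput 2: {result}"
-- ===== Notes on version B (the rewrite author's own statement) =====
-- stated objective: alternative
-- what changed: Instead of rotating the string n times and tallying matches, B finds the smallest divisor d of n whose length-d prefix block tiles the string and returns count = n // d, checking only divisors instead of performing rotations.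
import Mathlib
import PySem

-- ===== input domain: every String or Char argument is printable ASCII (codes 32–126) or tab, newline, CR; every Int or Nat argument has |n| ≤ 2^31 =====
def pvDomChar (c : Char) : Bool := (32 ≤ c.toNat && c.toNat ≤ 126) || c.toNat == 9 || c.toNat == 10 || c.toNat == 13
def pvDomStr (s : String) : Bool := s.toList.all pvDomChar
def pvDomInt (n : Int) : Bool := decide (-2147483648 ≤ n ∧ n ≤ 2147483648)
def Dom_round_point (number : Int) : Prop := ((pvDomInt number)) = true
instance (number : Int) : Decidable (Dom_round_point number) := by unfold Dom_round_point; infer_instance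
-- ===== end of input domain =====

-- B replaces A's rotate-n-times-and-count loop by scanning the divisors d of n for the
-- smallest one whose length-d prefix block tiles the string and returning count = n / d
-- (objective: alternative decomposition; identical output strings).

-- ===== PORT A =====
-- strings are handled as List Char (exact: Python string equality/concatenation = list equality/append);
-- rotated[1:] + rotated[0] is ported as drop 1 ++ take 1, exact here since the string is nonempty (n ≥ 2).
def round_point (number : Int) : String :=
  let cs : List Char := (PySem.Int.toStr |number|).toList   -- str(abs(number))
  let n := cs.length
  if n < 2 ∨ n > 6 then "Invalid input"
  else
    let st := (List.range n).foldl
      (fun (st : List Char × Nat) _ =>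
        let r := st.1.drop 1 ++ st.1.take 1
        (r, if r = cs then st.2 + 1 else st.2)) (cs, 0)
    let result := if st.2 ≥ 2 then "If it meets the condition" else "Does not meet the condition"
    "Output 1: " ++ PySem.Int.toStr (st.2 : Int) ++ "\nOutput 2: " ++ result

-- ===== PORT B =====
-- helper for the ternary choosing the verdict line
def pvVerdict (count : Nat) : String :=
  if count ≥ 2 then "If it meets the condition" else "Does not meet the condition"

-- Source B's for-d-with-break over range(1, n) is find? over List.range' 1 (n-1);
-- s[:d] * (n // d) (Python string repetition) is the flatten of replicate.
def round_point_alt (number : Int) : String :=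
  let cs : List Char := (PySem.Int.toStr |number|).toList   -- str(abs(number))
  let n := cs.length
  if 2 ≤ n ∧ n ≤ 6 then
    let count :=
      (((List.range' 1 (n - 1)).find?
          (fun d => n % d == 0 && cs == (List.replicate (n / d) (cs.take d)).flatten)).map
        (fun d => n / d)).getD 1
    "Output 1: " ++ PySem.Int.toStr (count : Int) ++ "\nOutput 2: " ++ pvVerdict count
  else "Invalid input"

-- ===== PRECONDITION & SPEC =====
def Spec_round_point (number : Int) (out : String) : Prop := out = round_point_alt number
instance (number : Int) (out : String) : Decidable (Spec_round_point number out) := by unfold Spec_round_point; infer_instance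

-- ===== CLAIM =====
def Claim_equal_round_point : Prop := ∀ (number : Int), Dom_round_point number → Spec_round_point number (round_point number)

-- ===== LEMMAS AND PROOFS =====

-- one step of A's loop is List.rotate 1
theorem rot1 (l : List Char) : l.drop 1 ++ l.take 1 = l.rotate 1 := by
  cases l with
  | nil => simp
  | cons a t => simp [List.rotate_cons_succ]

-- A's fold computes (rotate m, number of k ∈ [1, m] with rotate k = cs)
theorem foldA (cs : List Char) (m : Nat) :
    (List.range m).foldl
      (fun (st : List Char × Nat) _ =>
        let r := st.1.drop 1 ++ st.1.take 1
        (r, if r = cs then st.2 + 1 else st.2)) (cs, 0)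
    = (cs.rotate m, (List.range' 1 m).countP (fun k => cs.rotate k == cs)) := by
  induction m with
  | zero => simp
  | succ m ih =>
      rw [List.range_succ, List.foldl_append, ih, List.range'_concat, List.countP_append]
      simp only [List.foldl_cons, List.foldl_nil, rot1, List.rotate_rotate]
      by_cases h : cs.rotate (m + 1) = cs <;>
        simp [h, Nat.add_comm]

-- converse: the least satisfying element in the range is what find? returns
theorem find?_range'_eq_some {f : Nat → Bool} : ∀ (n s p : Nat),
    s ≤ p → p < s + n → f p = true → (∀ k, s ≤ k → k < p → f k = false) →
    (List.range' s n).find? f = some p := by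
  intro n
  induction n with
  | zero => intro s p h1 h2; omega
  | succ n ih =>
      intro s p h1 h2 hp hmin
      rw [List.range'_succ]
      rcases Nat.eq_or_lt_of_le h1 with rfl | hlt
      · rw [List.find?_cons_of_pos hp]
      · rw [List.find?_cons_of_neg (by simp [hmin s le_rfl hlt])]
        exact ih (s + 1) p hlt (by omega) hp (fun k hk1 hk2 => hmin k (by omega) hk2)

-- find? on range' finds nothing when nothing in the range satisfies f
theorem find?_range'_eq_none {f : Nat → Bool} (n s : Nat)
    (h : ∀ k, s ≤ k → k < s + n → f k = false) :
    (List.range' s n).find? f = none := by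
  rw [List.find?_eq_none]
  intro x hx
  rw [List.mem_range'_1] at hx
  simp [h x hx.1 (by omega)]

-- rotate k = cs → p ∣ k, for the least positive period p
theorem dvd_of_rotate_eq (cs : List Char) (p : Nat) (hp : 0 < p)
    (hpp : cs.rotate p = cs) (hmin : ∀ k, 0 < k → k < p → cs.rotate k ≠ cs) :
    ∀ k, cs.rotate k = cs → p ∣ k := by
  intro k
  induction k using Nat.strong_induction_on with
  | _ k ih =>
    intro hk
    rcases Nat.lt_or_ge k p with h | h
    · rcases Nat.eq_zero_or_pos k with rfl | hk0
      · exact Dvd.intro 0 rfl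
      · exact absurd hk (hmin k hk0 h)
    · have hsub : cs.rotate (k - p) = cs := by
        apply List.rotate_injective p
        show (cs.rotate (k - p)).rotate p = cs.rotate p
        rw [List.rotate_rotate, Nat.sub_add_cancel h, hk, hpp]
      have hd := ih (k - p) (by omega) hsub
      have : p ∣ (k - p) + p := Nat.dvd_add hd dvd_rfl
      rwa [Nat.sub_add_cancel h] at this

theorem rotate_eq_of_dvd (cs : List Char) (p : Nat) (hpp : cs.rotate p = cs) :
    ∀ m, cs.rotate (p * m) = cs := by
  intro m
  induction m with
  | zero => simp
  | succ m ih => rw [Nat.mul_succ, ← List.rotate_rotate, ih, hpp]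

-- counting multiples of p in [1, n]
theorem countP_dvd (n p : Nat) :
    (List.range' 1 n).countP (fun k => decide (p ∣ k)) = n / p := by
  have h := Nat.Ioc_filter_dvd_card_eq_div n p
  rw [Nat.Ioc_eq_range'] at h
  simpa [Finset.card, Finset.filter, Multiset.countP_eq_card_filter,
    List.countP_eq_length_filter] using h

-- rotation by d fixes cs → the length-d prefix tiles every prefix of cs of length m*d
theorem tile_of_rotate (cs : List Char) (d : Nat) (hd : cs.rotate d = cs) :
    ∀ m, m * d ≤ cs.length → (List.replicate m (cs.take d)).flatten = cs.take (m * d) := by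
  intro m
  induction m with
  | zero => simp
  | succ m ih =>
      intro hle
      have hmd : m * d ≤ cs.length := by
        calc m * d ≤ (m + 1) * d := by nlinarith
        _ ≤ cs.length := hle
      have hrot : cs.drop (m * d) ++ cs.take (m * d) = cs := by
        have := rotate_eq_of_dvd cs d hd m
        rw [Nat.mul_comm] at this
        rwa [List.rotate_eq_drop_append_take hmd] at this
      have hle' : m * d + d ≤ cs.length := by
        have : (m + 1) * d = m * d + d := by ring
        omega
      have hblk : (cs.drop (m * d)).take d = cs.take d := by
        conv_rhs => rw [← hrot,
          List.take_append_of_le_length (by simp only [List.length_drop]; omega)]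
      rw [List.replicate_succ', List.flatten_append, ih hmd,
        show (m + 1) * d = m * d + d by ring, List.take_add, hblk]
      simp

-- conversely a tiling by the length-d prefix forces rotation by d to fix cs
theorem rotate_of_tile (cs : List Char) (d m : Nat) (_hd : 0 < d) (hm : 0 < m)
    (hlen : cs.length = m * d)
    (ht : cs = (List.replicate m (cs.take d)).flatten) :
    cs.rotate d = cs := by
  have hdle : d ≤ cs.length := by nlinarith
  rw [List.rotate_eq_drop_append_take hdle]
  set b := cs.take d with hb
  have hbl : b.length = d := by simp [hb]; omega
  obtain ⟨m', rfl⟩ := Nat.exists_eq_succ_of_ne_zero (Nat.pos_iff_ne_zero.mp hm)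
  have hdrop : cs.drop d = (List.replicate m' b).flatten := by
    conv_lhs => rw [ht]
    rw [List.replicate_succ, List.flatten_cons, List.drop_append_of_le_length (by omega),
      List.drop_of_length_le (by omega), List.nil_append]
  rw [hdrop]
  conv_rhs => rw [ht]
  rw [List.replicate_succ', List.flatten_append]
  simp

-- the core equality: A's tally = B's divisor-scan count, for 2 ≤ n
theorem core (cs : List Char) (h2 : 2 ≤ cs.length) :
    (List.range' 1 cs.length).countP (fun k => cs.rotate k == cs)
      = (((List.range' 1 (cs.length - 1)).find?
            (fun d => cs.length % d == 0 &&
                cs == (List.replicate (cs.length / d) (cs.take d)).flatten)).map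
          (fun d => cs.length / d)).getD 1 := by
  set n := cs.length with hn
  -- p := the least positive k with cs.rotate k = cs (k = n works)
  obtain ⟨p, hpmem, hpeq, hpmin⟩ :
      ∃ p, (1 ≤ p ∧ p ≤ n) ∧ cs.rotate p = cs ∧ ∀ k, 1 ≤ k → k < p → cs.rotate k ≠ cs := by
    have hex : ∃ k, 1 ≤ k ∧ cs.rotate k = cs := ⟨n, by omega, List.rotate_length cs⟩
    refine ⟨Nat.find hex, ⟨(Nat.find_spec hex).1,
      Nat.find_le ⟨by omega, List.rotate_length cs⟩⟩, (Nat.find_spec hex).2, ?_⟩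
    intro k hk1 hkp hkr
    exact Nat.find_min hex hkp ⟨hk1, hkr⟩
  have hmin' : ∀ k, 0 < k → k < p → cs.rotate k ≠ cs := fun k a => hpmin k a
  have hdvd := dvd_of_rotate_eq cs p (by omega) hpeq hmin'
  have hpn : p ∣ n := hdvd n (List.rotate_length cs)
  -- LHS = n / p
  have hL : (List.range' 1 n).countP (fun k => cs.rotate k == cs) = n / p := by
    rw [List.countP_congr (q := fun k => decide (p ∣ k)) ?_, countP_dvd]
    intro k hk
    rw [List.mem_range'_1] at hk
    by_cases hd : p ∣ k
    · obtain ⟨m, rfl⟩ := hd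
      simp [rotate_eq_of_dvd cs p hpeq m, Dvd.intro m rfl]
    · have hne : cs.rotate k ≠ cs := fun hr => hd (hdvd k hr)
      simp [hd, hne]
  -- characterise B's test: for 1 ≤ d ≤ n it holds iff d ∣ n ∧ p ∣ d
  have hcond : ∀ d, 1 ≤ d → d ≤ n →
      ((n % d == 0 && cs == (List.replicate (n / d) (cs.take d)).flatten) = true
        ↔ (d ∣ n ∧ p ∣ d)) := by
    intro d h1 hdn
    rw [Bool.and_eq_true, beq_iff_eq, beq_iff_eq, ← Nat.dvd_iff_mod_eq_zero]
    constructor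
    · rintro ⟨hdvdn, htile⟩
      refine ⟨hdvdn, hdvd d ?_⟩
      exact rotate_of_tile cs d (n / d) (by omega) (Nat.div_pos hdn (by omega))
        (by rw [← hn, Nat.div_mul_cancel hdvdn]) htile
    · rintro ⟨hdvdn, hpd⟩
      have hrot : cs.rotate d = cs := by
        obtain ⟨m, rfl⟩ := hpd
        exact rotate_eq_of_dvd cs p hpeq m
      refine ⟨hdvdn, ?_⟩
      have := tile_of_rotate cs d hrot (n / d) (by rw [Nat.div_mul_cancel hdvdn])
      rw [this, Nat.div_mul_cancel hdvdn, hn, List.take_length]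
  rcases Nat.lt_or_ge p n with hplt | hpge
  -- p < n : find? returns p, both sides are n / p
  · have hfind : (List.range' 1 (n - 1)).find?
        (fun d => n % d == 0 && cs == (List.replicate (n / d) (cs.take d)).flatten) = some p := by
      apply find?_range'_eq_some _ _ _ (by omega) (by omega)
      · exact (hcond p (by omega) (by omega)).mpr ⟨hpn, dvd_rfl⟩
      · intro k hk1 hkp
        rw [← Bool.not_eq_true]
        intro hc
        have := ((hcond k hk1 (by omega)).mp hc).2
        have := Nat.le_of_dvd (by omega) this
        omega
    rw [hfind, hL, Option.map_some, Option.getD_some]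
  -- p = n : no divisor below n passes, find? = none, both sides are 1
  · have hpe : p = n := by omega
    have hfind : (List.range' 1 (n - 1)).find?
        (fun d => n % d == 0 && cs == (List.replicate (n / d) (cs.take d)).flatten) = none := by
      apply find?_range'_eq_none
      intro k hk1 hk2
      rw [← Bool.not_eq_true]
      intro hc
      have := ((hcond k hk1 (by omega)).mp hc).2
      have := Nat.le_of_dvd (by omega) this
      omega
    rw [hfind, hL, hpe, Nat.div_self (by omega), Option.map_none, Option.getD_none]

-- ===== VERDICT =====
theorem round_point_spec : Claim_equal_round_point := by
  intro number _
  unfold Spec_round_point round_point round_point_alt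
  simp only []
  set cs := (PySem.Int.toStr |number|).toList with hcs
  by_cases h : cs.length < 2 ∨ cs.length > 6
  · have hB : ¬(2 ≤ cs.length ∧ cs.length ≤ 6) := by omega
    rw [if_pos h, if_neg hB]
  · have hB : 2 ≤ cs.length ∧ cs.length ≤ 6 := by omega
    rw [if_neg h, if_pos hB, foldA, core cs (by omega)]
    rfl
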